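-- pv_equiv track=rewrite | github.com/wxdangel-ship-it/nav-road-pipeline | scripts/run_lidar_clip_truthbuf10_0010_f280_300.py | _pick_truth_layer
-- ===== SOURCE A (Python) =====
-- from typing import Dict, List, Optional, Tuple
--
-- def _pick_truth_layer(layers: List[Dict[str, str]]) -> Optional[str]:
--     def is_poly(row: Dict[str, str]) -> bool:
--         gt = str(row.get("geometry_type", "")).lower()
--         return "polygon" in gt
--
--     for row in layers:
--         name = row["name"].lower()
--         if ("crosswalk" in name or "truth" in name) and is_poly(row):
--             return row["name"]
--     for row in layers:
--         if is_poly(row):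
--             return row["name"]
--     return None
-- ===== SOURCE B (Python) =====
-- def _pick_truth_layer(layers):
--     fallback = None
--     for row in layers:
--         name = row["name"]
--         low = name.lower()
--         poly = "polygon" in str(row.get("geometry_type", "")).lower()
--         if poly and ("crosswalk" in low or "truth" in low):
--             return name
--         if poly and fallback is None:
--             fallback = name
--     return fallback
-- ===== Notes on version B (the rewrite author's own statement) =====
-- stated objective: simpler
-- what changed: Replaces A's two sequential passes (one for preferred crosswalk/truth polygons, a second full rescan for any polygon) with a single pass that returns a preferred polygon immediately and remembers the first plain polygon in a fallback variable.
import Mathlib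
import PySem

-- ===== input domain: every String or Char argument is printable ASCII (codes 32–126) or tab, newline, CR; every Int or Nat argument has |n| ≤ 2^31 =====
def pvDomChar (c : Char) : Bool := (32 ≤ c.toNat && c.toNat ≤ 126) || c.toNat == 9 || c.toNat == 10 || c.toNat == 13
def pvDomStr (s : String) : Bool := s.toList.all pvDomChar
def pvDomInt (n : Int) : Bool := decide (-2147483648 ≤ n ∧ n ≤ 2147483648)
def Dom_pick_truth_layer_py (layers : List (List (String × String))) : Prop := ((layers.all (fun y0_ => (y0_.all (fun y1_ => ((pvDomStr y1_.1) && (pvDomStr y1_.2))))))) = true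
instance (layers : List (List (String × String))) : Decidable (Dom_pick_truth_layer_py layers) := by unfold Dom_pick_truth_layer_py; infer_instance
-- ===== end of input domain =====

-- B replaces A's two passes with one pass carrying a fallback for the first plain polygon (simpler; same O(n) cost).


-- shared helper: is_poly(row) — str of a str is the identity, so str(...) is dropped
def pvIsPoly (row : List (String × String)) : Bool :=
  PySem.Str.isIn "polygon" (PySem.Str.lower (PySem.Dict.getD (PySem.Dict.mk row) "geometry_type" ""))

-- ===== PORT A =====
-- first loop: 'none' on a missing "name" key models the KeyError (those inputs are outside Pre_)
def pvLoop1 : List (List (String × String)) → Option String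
  | [] => none
  | row :: rest =>
    match (PySem.Dict.mk row).get? "name" with
    | none => none
    | some nm =>
      let name := PySem.Str.lower nm
      if (PySem.Str.isIn "crosswalk" name || PySem.Str.isIn "truth" name) && pvIsPoly row then some nm
      else pvLoop1 rest

-- second loop (row["name"] of the first polygon row; under Pre_ this key is present)
def pvLoop2 : List (List (String × String)) → Option String
  | [] => none
  | row :: rest => if pvIsPoly row then (PySem.Dict.mk row).get? "name" else pvLoop2 rest

def pick_truth_layer_py (layers : List (List (String × String))) : Option String :=
  match pvLoop1 layers with
  | some s => some s
  | none => pvLoop2 layers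

-- ===== PORT B =====
-- single pass with a fallback accumulator; 'none' on a missing "name" key models the KeyError (outside Pre_)
def pvBLoop : List (List (String × String)) → Option String → Option String
  | [], fb => fb
  | row :: rest, fb =>
    match (PySem.Dict.mk row).get? "name" with
    | none => none
    | some nm =>
      let low := PySem.Str.lower nm
      let poly := pvIsPoly row
      if poly && (PySem.Str.isIn "crosswalk" low || PySem.Str.isIn "truth" low) then some nm
      else if poly && fb.isNone then pvBLoop rest (some nm) else pvBLoop rest fb

def pick_truth_layer_py_alt (layers : List (List (String × String))) : Option String :=
  pvBLoop layers none

-- ===== PRECONDITION & SPEC =====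
-- row predicates used to state where the Python raises
def pvHasName (row : List (String × String)) : Bool := (PySem.Dict.mk row).contains "name"

-- a "preferred" row: has a name containing crosswalk/truth (lower-cased) and is a polygon
def pvRowPref (row : List (String × String)) : Bool :=
  match (PySem.Dict.mk row).get? "name" with
  | none => false
  | some nm =>
    (PySem.Str.isIn "crosswalk" (PySem.Str.lower nm) || PySem.Str.isIn "truth" (PySem.Str.lower nm)) && pvIsPoly row

-- Pre_ excludes exactly the inputs on which A raises KeyError: every row must carry a "name" key
-- unless some earlier row is already a preferred match (A returns before reaching it)
def Pre_pick_truth_layer_py (layers : List (List (String × String))) : Prop :=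
  ∀ i < layers.length, pvHasName (layers.getD i []) = true ∨ ∃ j < i, pvRowPref (layers.getD j []) = true
instance (layers : List (List (String × String))) : Decidable (Pre_pick_truth_layer_py layers) := by unfold Pre_pick_truth_layer_py; infer_instance

def pvWitness_pick_truth_layer_py : (List (List (String × String))) :=
  [[("name", "Truth buffer"), ("geometry_type", "Polygon")], [("name", "lane"), ("geometry_type", "line")]]

def Spec_pick_truth_layer_py (layers : List (List (String × String))) (out : Option String) : Prop := out = pick_truth_layer_py_alt layers
instance (layers : List (List (String × String))) (out : Option String) : Decidable (Spec_pick_truth_layer_py layers out) := by unfold Spec_pick_truth_layer_py; infer_instance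

-- ===== CLAIM (what is proved, stated in full; the proofs are below) =====
def Claim_equal_pick_truth_layer_py : Prop := ∀ (layers : List (List (String × String))), Dom_pick_truth_layer_py layers → Pre_pick_truth_layer_py layers → Spec_pick_truth_layer_py layers (pick_truth_layer_py layers)

-- ===== LEMMAS AND PROOFS =====

-- recursive restatement of Pre_ used by the induction below
def pvPreOk : List (List (String × String)) → Bool
  | [] => true
  | row :: rest => pvHasName row && (pvRowPref row || pvPreOk rest)

theorem pvPreOk_of_pre (l : List (List (String × String)))
    (h : ∀ i < l.length, pvHasName (l.getD i []) = true ∨ ∃ j < i, pvRowPref (l.getD j []) = true) :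
    pvPreOk l = true := by
  induction l with
  | nil => rfl
  | cons row rest ih =>
    have h0 := h 0 (by simp)
    simp only [List.getD_cons_zero] at h0
    have hname : pvHasName row = true := by
      rcases h0 with h0 | ⟨j, hj, _⟩
      · exact h0
      · omega
    by_cases hp : pvRowPref row = true
    · simp [pvPreOk, hname, hp]
    · have hrest : pvPreOk rest = true := by
        apply ih
        intro i hi
        have hi1 := h (i + 1) (by simp; omega)
        simp only [List.getD_cons_succ] at hi1
        rcases hi1 with h1 | ⟨j, hj, hpref⟩
        · exact Or.inl h1
        · cases j with
          | zero =>
            simp only [List.getD_cons_zero] at hpref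
            exact absurd hpref hp
          | succ j' =>
            exact Or.inr ⟨j', by omega, by simpa [List.getD_cons_succ] using hpref⟩
      simp [pvPreOk, hname, hrest]

-- the one-pass loop with fallback equals: first-loop result, else the fallback, else the second-loop result
theorem pvBLoop_eq (l : List (List (String × String))) (fb : Option String) (h : pvPreOk l = true) :
    pvBLoop l fb =
      match pvLoop1 l with
      | some x => some x
      | none => match fb with
        | some f => some f
        | none => pvLoop2 l := by
  induction l generalizing fb with
  | nil =>
    cases fb <;> simp [pvBLoop, pvLoop1, pvLoop2]
  | cons row rest ih =>
    simp only [pvPreOk, Bool.and_eq_true, Bool.or_eq_true] at h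
    obtain ⟨hname, hrest⟩ := h
    have hsome : ∃ nm, (PySem.Dict.mk row).get? "name" = some nm := by
      rw [pvHasName, PySem.Dict.contains_eq_isSome_get?] at hname
      exact Option.isSome_iff_exists.mp hname
    obtain ⟨nm, hnm⟩ := hsome
    by_cases hpref : pvRowPref row = true
    · -- preferred row: both sides return nm immediately
      simp only [pvRowPref, hnm, Bool.and_eq_true] at hpref
      obtain ⟨hcwtr, hpoly⟩ := hpref
      simp at hcwtr
      simp [pvBLoop, pvLoop1, hnm, hpoly, hcwtr]
    · simp only [pvRowPref, hnm] at hpref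
      have hrest' : pvPreOk rest = true := by
        rcases hrest with h1 | h2
        · simp only [pvRowPref, hnm] at h1
          exact absurd h1 hpref
        · exact h2
      by_cases hpoly : pvIsPoly row = true
      · -- plain polygon row: it becomes the fallback when none is set yet
        have hcw : (PySem.Str.isIn "crosswalk" (PySem.Str.lower nm)
            || PySem.Str.isIn "truth" (PySem.Str.lower nm)) = false := by
          cases hc : (PySem.Str.isIn "crosswalk" (PySem.Str.lower nm)
              || PySem.Str.isIn "truth" (PySem.Str.lower nm))
          · rfl
          · exact absurd (by rw [hc, Bool.true_and]; exact hpoly) hpref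

        have hcw' := hcw
        simp at hcw'
        cases fb with
        | none =>
          simp [pvBLoop, pvLoop1, hnm, hpoly, hcw']
          rw [ih _ hrest']
          cases pvLoop1 rest <;> simp [pvLoop2, hpoly, hnm]
        | some f =>
          simp [pvBLoop, pvLoop1, hnm, hpoly, hcw']
          rw [ih _ hrest']
      · -- not a polygon: both sides just skip the row
        have hpoly' : pvIsPoly row = false := by simpa using hpoly
        simp [pvBLoop, pvLoop1, pvLoop2, hnm, hpoly']
        rw [ih _ hrest']

-- ===== VERDICT (by name: the statement is the Claim_ definition above) =====
theorem pick_truth_layer_py_spec : Claim_equal_pick_truth_layer_py := by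
  intro layers _ hpre
  unfold Spec_pick_truth_layer_py pick_truth_layer_py pick_truth_layer_py_alt
  rw [pvBLoop_eq layers none (pvPreOk_of_pre layers hpre)]
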